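-- pv_equiv track=rewrite | github.com/mfloresz/novel-translator | src/gui/log_window.py | format_log_with_colors
-- ===== SOURCE A (Python) =====
-- def format_log_with_colors(content):
--     """Formatea el contenido del log con colores HTML según el nivel"""
--     lines = content.split('\n')
--     formatted_lines = []
--
--     for line in lines:
--         if '[ERROR]' in line:
--             # Rojo para errores
--             formatted_lines.append(f'<span style="color: #ff4444;">{line}</span>')
--         elif '[WARNING]' in line:
--             # Naranja para warnings
--             formatted_lines.append(f'<span style="color: #ff8800;">{line}</span>')
--         elif '[API_ERROR]' in line:
--             # Rojo oscuro para errores de API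
--             formatted_lines.append(f'<span style="color: #cc0000;">{line}</span>')
--         elif '[INFO]' in line:
--             # Azul para info
--             formatted_lines.append(f'<span style="color: #4444ff;">{line}</span>')
--         elif '[API_REQUEST]' in line or '[API_RESPONSE]' in line:
--             # Verde para requests/responses de API
--             formatted_lines.append(f'<span style="color: #44aa44;">{line}</span>')
--         elif '[TRANSLATION_START]' in line or '[TRANSLATION_COMPLETE]' in line:
--             # Púrpura para traducciones
--             formatted_lines.append(f'<span style="color: #aa44aa;">{line}</span>')
--         elif '[CHECK_RESULT]' in line:
--             # Cyan para resultados de check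
--             formatted_lines.append(f'<span style="color: #44aaaa;">{line}</span>')
--         else:
--             # Color por defecto (negro o color del sistema)
--             formatted_lines.append(line)
--
--     # Unir con saltos de línea HTML y estilos para word-wrap
--     html_content = '<div style="word-wrap: break-word; white-space: pre-wrap; font-family: \'Courier New\', monospace;">' + '<br>'.join(formatted_lines) + '</div>'
--     return html_content
-- ===== SOURCE B (Python) =====
-- # Different algorithm: instead of testing each known tag against each line, B parses the
-- # bracketed tokens actually present in the line ('[' up to the next ']') and looks them up
-- # in a tag -> (priority, color) dict, keeping the minimum-priority hit.
--
-- _TAG_INFO = {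
--     '[ERROR]': (0, '#ff4444'),
--     '[WARNING]': (1, '#ff8800'),
--     '[API_ERROR]': (2, '#cc0000'),
--     '[INFO]': (3, '#4444ff'),
--     '[API_REQUEST]': (4, '#44aa44'),
--     '[API_RESPONSE]': (4, '#44aa44'),
--     '[TRANSLATION_START]': (5, '#aa44aa'),
--     '[TRANSLATION_COMPLETE]': (5, '#aa44aa'),
--     '[CHECK_RESULT]': (6, '#44aaaa'),
-- }
--
--
-- def _colorize(line):
--     best = None
--     for i, ch in enumerate(line):
--         if ch == '[':
--             j = line.find(']', i)
--             if j == -1: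
--                 break
--             info = _TAG_INFO.get(line[i:j + 1])
--             if info is not None and (best is None or info[0] < best[0]):
--                 best = info
--     if best is None:
--         return line
--     return '<span style="color: ' + best[1] + ';">' + line + '</span>'
--
--
-- def format_log_with_colors(content):
--     body = '<br>'.join(_colorize(line) for line in content.split('\n'))
--     return ('<div style="word-wrap: break-word; white-space: pre-wrap; '
--             "font-family: 'Courier New', monospace;\">" + body + '</div>')
-- ===== Notes on version B (the rewrite author's own statement) =====
-- stated objective: alternative
-- what changed: Instead of testing every known tag as a substring of each line in an if/elif chain, B parses the bracketed tokens actually present in each line ('[' through the next ']'), looks each up in a tag -> (priority, color) dict, and wraps the line with the color of the minimum-priority hit.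
import Mathlib
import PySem

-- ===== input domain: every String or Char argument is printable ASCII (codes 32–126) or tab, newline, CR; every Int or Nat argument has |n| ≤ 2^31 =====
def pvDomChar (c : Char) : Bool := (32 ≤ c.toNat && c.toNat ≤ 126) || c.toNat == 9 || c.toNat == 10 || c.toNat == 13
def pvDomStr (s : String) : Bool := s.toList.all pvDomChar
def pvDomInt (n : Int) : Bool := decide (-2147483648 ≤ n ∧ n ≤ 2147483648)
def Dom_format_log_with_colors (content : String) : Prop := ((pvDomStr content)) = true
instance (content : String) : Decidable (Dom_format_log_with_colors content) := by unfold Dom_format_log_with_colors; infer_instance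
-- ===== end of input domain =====

-- B replaces A's per-line chain of tag-substring tests by parsing the bracketed tokens
-- present in each line and looking them up in a tag → (priority, color) table, keeping
-- the minimum-priority hit; same output everywhere (objective: alternative).

-- ===== PORT A =====
-- per-line if/elif chain, branch order as in the Python
def pvFmtLineA (line : String) : String :=
  if PySem.Str.isIn "[ERROR]" line then
    "<span style=\"color: #ff4444;\">" ++ line ++ "</span>"
  else if PySem.Str.isIn "[WARNING]" line then
    "<span style=\"color: #ff8800;\">" ++ line ++ "</span>"
  else if PySem.Str.isIn "[API_ERROR]" line then
    "<span style=\"color: #cc0000;\">" ++ line ++ "</span>"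
  else if PySem.Str.isIn "[INFO]" line then
    "<span style=\"color: #4444ff;\">" ++ line ++ "</span>"
  else if PySem.Str.isIn "[API_REQUEST]" line || PySem.Str.isIn "[API_RESPONSE]" line then
    "<span style=\"color: #44aa44;\">" ++ line ++ "</span>"
  else if PySem.Str.isIn "[TRANSLATION_START]" line || PySem.Str.isIn "[TRANSLATION_COMPLETE]" line then
    "<span style=\"color: #aa44aa;\">" ++ line ++ "</span>"
  else if PySem.Str.isIn "[CHECK_RESULT]" line then
    "<span style=\"color: #44aaaa;\">" ++ line ++ "</span>"
  else
    line

def format_log_with_colors (content : String) : String :=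
  let lines := (PySem.Str.split? content "\n").getD []
  let formatted_lines := lines.foldl (fun acc line => acc ++ [pvFmtLineA line]) []
  "<div style=\"word-wrap: break-word; white-space: pre-wrap; font-family: 'Courier New', monospace;\">"
    ++ PySem.Str.join "<br>" formatted_lines ++ "</div>"

-- ===== PORT B =====
-- _TAG_INFO.get: dict lookup on the literal tag table (first matching key)
def pvLookupTag (tok : List Char) : Option (Nat × String) :=
  if tok = "[ERROR]".toList then some (0, "#ff4444")
  else if tok = "[WARNING]".toList then some (1, "#ff8800")
  else if tok = "[API_ERROR]".toList then some (2, "#cc0000")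
  else if tok = "[INFO]".toList then some (3, "#4444ff")
  else if tok = "[API_REQUEST]".toList then some (4, "#44aa44")
  else if tok = "[API_RESPONSE]".toList then some (4, "#44aa44")
  else if tok = "[TRANSLATION_START]".toList then some (5, "#aa44aa")
  else if tok = "[TRANSLATION_COMPLETE]".toList then some (5, "#aa44aa")
  else if tok = "[CHECK_RESULT]".toList then some (6, "#44aaaa")
  else none

-- rest[:rest.find(']') + 1]: the prefix of rest through its first ']' (none if no ']')
def pvUpToClose : List Char → Option (List Char)
  | [] => none
  | c :: rs => if c = ']' then some [c] else (pvUpToClose rs).map (fun t => c :: t)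

-- the 'while rest:' loop of _colorize: walk the suffixes, keep the minimum-priority hit
def pvScanB : List Char → Option (Nat × String) → Option (Nat × String)
  | [], best => best
  | c :: rs, best =>
    if c = '[' then
      match pvUpToClose (c :: rs) with
      | none => best        -- break: no ']' left in the line
      | some tok =>
        pvScanB rs
          (match pvLookupTag tok, best with
           | some info, none => some info
           | some info, some b0 => if info.1 < b0.1 then some info else some b0
           | none, _ => best)
    else pvScanB rs best

def pvColorizeB (line : String) : String :=
  match pvScanB line.toList none with
  | none => line
  | some info => "<span style=\"color: " ++ info.2 ++ ";\">" ++ line ++ "</span>"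

def format_log_with_colors_alt (content : String) : String :=
  let body := PySem.Str.join "<br>" (((PySem.Str.split? content "\n").getD []).map pvColorizeB)
  "<div style=\"word-wrap: break-word; white-space: pre-wrap; font-family: 'Courier New', monospace;\">"
    ++ body ++ "</div>"

-- ===== PRECONDITION & SPEC =====
def Spec_format_log_with_colors (content : String) (out : String) : Prop := out = format_log_with_colors_alt content
instance (content : String) (out : String) : Decidable (Spec_format_log_with_colors content out) := by unfold Spec_format_log_with_colors; infer_instance

-- ===== CLAIM (what is proved, stated in full; the proofs are below) =====
def Claim_equal_format_log_with_colors : Prop := ∀ (content : String), Dom_format_log_with_colors content → Spec_format_log_with_colors content (format_log_with_colors content)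

-- ===== LEMMAS AND PROOFS =====

-- priority → color table (the colors of the dict, indexed by priority)
def pvColorTab : Nat → String
  | 0 => "#ff4444"
  | 1 => "#ff8800"
  | 2 => "#cc0000"
  | 3 => "#4444ff"
  | 4 => "#44aa44"
  | 5 => "#aa44aa"
  | 6 => "#44aaaa"
  | _ => ""

-- the tokens B's scan inspects
def pvToks : List Char → List (List Char)
  | [] => []
  | c :: rs =>
    if c = '[' then
      match pvUpToClose (c :: rs) with
      | none => []
      | some tok => tok :: pvToks rs
    else pvToks rs

def pvUpd (b : Option (Nat × String)) (tok : List Char) : Option (Nat × String) :=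
  match pvLookupTag tok, b with
  | some info, none => some info
  | some info, some b0 => if info.1 < b0.1 then some info else some b0
  | none, _ => b

def pvRanks (cs : List Char) : List Nat :=
  (pvToks cs).filterMap (fun t => (pvLookupTag t).map Prod.fst)

def pvOptMin (b : Option Nat) (l : List Nat) : Option Nat :=
  l.foldl (fun ob r => some (match ob with | none => r | some m => min m r)) b

theorem pvUpToClose_eq_none_iff (l : List Char) : pvUpToClose l = none ↔ ']' ∉ l := by
  induction l with
  | nil => simp [pvUpToClose]
  | cons c rs ih =>
    by_cases h : c = ']'
    · simp [pvUpToClose, h]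
    · simp only [pvUpToClose, if_neg h, Option.map_eq_none_iff, ih, List.mem_cons]
      constructor
      · intro hn hx
        rcases hx with hx | hx
        · exact h hx.symm
        · exact hn hx
      · intro hn hx
        exact hn (Or.inr hx)

theorem pvUpToClose_append (u v : List Char) (h : ']' ∉ u) :
    pvUpToClose (u ++ ']' :: v) = some (u ++ [']']) := by
  induction u with
  | nil => simp [pvUpToClose]
  | cons c cs ih =>
    have hc : c ≠ ']' := by intro hc; exact h (hc ▸ List.mem_cons_self)
    have h' : ']' ∉ cs := fun hm => h (List.mem_cons_of_mem _ hm)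
    simp [pvUpToClose, hc, ih h']

theorem pvUpToClose_prefix (l t : List Char) (h : pvUpToClose l = some t) : t <+: l := by
  induction l generalizing t with
  | nil => simp [pvUpToClose] at h
  | cons c rs ih =>
    by_cases hc : c = ']'
    · simp [pvUpToClose, hc] at h
      subst h; subst hc; exact ⟨rs, rfl⟩
    · simp [pvUpToClose, hc] at h
      obtain ⟨t', ht', rfl⟩ := h
      exact List.cons_prefix_cons.mpr ⟨rfl, ih t' ht'⟩

theorem pvToks_infix (cs tok : List Char) (h : tok ∈ pvToks cs) : tok <:+: cs := by
  induction cs with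
  | nil => simp [pvToks] at h
  | cons c rs ih =>
    by_cases hc : c = '['
    · rw [pvToks, if_pos hc] at h
      cases hup : pvUpToClose (c :: rs) with
      | none => rw [hup] at h; simp at h
      | some t =>
        rw [hup] at h
        rcases List.mem_cons.mp h with h1 | h2
        · exact h1 ▸ (pvUpToClose_prefix _ _ hup).isInfix
        · exact List.infix_cons (ih h2)
    · rw [pvToks, if_neg hc] at h
      exact List.infix_cons (ih h)

theorem pvMem_toks_of_infix (cs mid : List Char) (hm : ']' ∉ mid)
    (h : ('[' :: mid ++ [']']) <:+: cs) : ('[' :: mid ++ [']']) ∈ pvToks cs := by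
  induction cs with
  | nil => simp at h
  | cons c rs ih =>
    rcases List.infix_cons_iff.mp h with hp | hi
    · obtain ⟨hc, hp'⟩ := List.cons_prefix_cons.mp hp
      obtain ⟨w, hw⟩ := hp'
      have hml : ']' ∉ ('[' :: mid) := by
        intro hx
        rcases List.mem_cons.mp hx with h1 | h1
        · exact absurd h1.symm (by decide)
        · exact hm h1
      have hup : pvUpToClose (c :: rs) = some ('[' :: mid ++ [']']) := by
        rw [← hc, ← hw]
        have : ('[' :: mid) ++ ']' :: w = '[' :: ((mid ++ [']']) ++ w) := by simp
        calc pvUpToClose ('[' :: (mid ++ [']']) ++ w)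
            = pvUpToClose (('[' :: mid) ++ ']' :: w) := by simp
          _ = some (('[' :: mid) ++ [']']) := pvUpToClose_append _ _ hml
          _ = some ('[' :: mid ++ [']']) := by simp
      rw [pvToks, if_pos hc.symm, hup]
      exact List.mem_cons_self
    · have htok := ih hi
      by_cases hc : c = '['
      · rw [pvToks, if_pos hc]
        have hmem : ']' ∈ rs := hi.subset (by simp)
        cases hup : pvUpToClose (c :: rs) with
        | none =>
          exact absurd ((pvUpToClose_eq_none_iff _).mp hup) (by simp [hmem])
        | some t => exact List.mem_cons_of_mem _ htok
      · rw [pvToks, if_neg hc]; exact htok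

theorem pvScanB_eq_fold (cs : List Char) (best : Option (Nat × String)) :
    pvScanB cs best = (pvToks cs).foldl pvUpd best := by
  induction cs generalizing best with
  | nil => rfl
  | cons c rs ih =>
    by_cases hc : c = '['
    · rw [pvScanB, if_pos hc, pvToks, if_pos hc]
      cases hup : pvUpToClose (c :: rs) with
      | none => rfl
      | some tok => rw [List.foldl_cons, ← ih]; rfl
    · rw [pvScanB, if_neg hc, pvToks, if_neg hc, ih]

theorem pvLookup_lt7 (t : List Char) (r : Nat)
    (h : (pvLookupTag t).map Prod.fst = some r) : r < 7 := by
  unfold pvLookupTag at h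
  split_ifs at h <;> simp_all <;> omega

theorem pvLookup_color (t : List Char) (r : Nat) (c : String)
    (h : pvLookupTag t = some (r, c)) : c = pvColorTab r := by
  unfold pvLookupTag at h
  split_ifs at h <;> simp_all <;> (obtain ⟨rfl, rfl⟩ := h) <;> rfl

theorem pvFold_upd (toks : List (List Char)) (b : Option Nat) :
    toks.foldl pvUpd (b.map (fun m => (m, pvColorTab m))) =
      (pvOptMin b (toks.filterMap (fun t => (pvLookupTag t).map Prod.fst))).map
        (fun m => (m, pvColorTab m)) := by
  induction toks generalizing b with
  | nil => rfl
  | cons t rest ih =>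
    rw [List.foldl_cons]
    cases hl : pvLookupTag t with
    | none =>
      have h1 : pvUpd (b.map (fun m => (m, pvColorTab m))) t
          = b.map (fun m => (m, pvColorTab m)) := by
        unfold pvUpd; rw [hl]
      rw [h1, List.filterMap_cons, hl]
      exact ih b
    | some info =>
      obtain ⟨r, c⟩ := info
      have hcol : c = pvColorTab r := pvLookup_color t r c hl
      rw [List.filterMap_cons, hl]
      simp only [Option.map_some]
      cases b with
      | none =>
        have h1 : pvUpd ((none : Option Nat).map (fun m => (m, pvColorTab m))) t
            = (some r).map (fun m => (m, pvColorTab m)) := by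
          unfold pvUpd; rw [hl]; simp [hcol]
        rw [h1]
        have h2 : pvOptMin none (r :: rest.filterMap (fun t => (pvLookupTag t).map Prod.fst))
            = pvOptMin (some r) (rest.filterMap (fun t => (pvLookupTag t).map Prod.fst)) := rfl
        rw [h2]; exact ih (some r)
      | some m =>
        have h1 : pvUpd ((some m).map (fun m => (m, pvColorTab m))) t
            = (some (min m r)).map (fun m => (m, pvColorTab m)) := by
          unfold pvUpd; rw [hl]
          simp only [Option.map_some]
          rcases Nat.lt_or_ge r m with hlt | hge
          · rw [if_pos hlt]; simp [hcol, Nat.min_eq_right (Nat.le_of_lt hlt)]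
          · rw [if_neg (by omega)]; simp [Nat.min_eq_left hge]
        rw [h1]
        have h2 : pvOptMin (some m) (r :: rest.filterMap (fun t => (pvLookupTag t).map Prod.fst))
            = pvOptMin (some (min m r)) (rest.filterMap (fun t => (pvLookupTag t).map Prod.fst)) := rfl
        rw [h2]; exact ih (some (min m r))

theorem pvOptMin_some (l : List Nat) (m : Nat) : pvOptMin (some m) l = some (l.foldl min m) := by
  induction l generalizing m with
  | nil => rfl
  | cons r rest ih =>
    have : pvOptMin (some m) (r :: rest) = pvOptMin (some (min m r)) rest := rfl
    rw [this, ih, List.foldl_cons]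

theorem pvOptMin_none (l : List Nat) : pvOptMin none l = l.min? := by
  cases l with
  | nil => rfl
  | cons r rest =>
    have : pvOptMin none (r :: rest) = pvOptMin (some r) rest := rfl
    rw [this, pvOptMin_some]; rfl

theorem pvMin_chain (S : List Nat) (h7 : ∀ r ∈ S, r < 7) (f : Nat → String) (d : String) :
    (match S.min? with | none => d | some r => f r)
      = if 0 ∈ S then f 0 else if 1 ∈ S then f 1 else if 2 ∈ S then f 2
        else if 3 ∈ S then f 3 else if 4 ∈ S then f 4 else if 5 ∈ S then f 5
        else if 6 ∈ S then f 6 else d := by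
  cases hm : S.min? with
  | none =>
    have : S = [] := List.min?_eq_none_iff.mp hm
    simp [this]
  | some m =>
    obtain ⟨hmem, hle⟩ := List.min?_eq_some_iff_subtype.mp hm
    have hm7 : m < 7 := h7 m hmem
    have hno : ∀ k, k < m → k ∉ S := fun k hk hx => by have := hle k hx; omega
    interval_cases m
    · simp [hmem]
    · simp [hno 0 (by omega), hmem]
    · simp [hno 0 (by omega), hno 1 (by omega), hmem]
    · simp [hno 0 (by omega), hno 1 (by omega), hno 2 (by omega), hmem]
    · simp [hno 0 (by omega), hno 1 (by omega), hno 2 (by omega), hno 3 (by omega), hmem]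
    · simp [hno 0 (by omega), hno 1 (by omega), hno 2 (by omega), hno 3 (by omega),
        hno 4 (by omega), hmem]
    · simp [hno 0 (by omega), hno 1 (by omega), hno 2 (by omega), hno 3 (by omega),
        hno 4 (by omega), hno 5 (by omega), hmem]

-- lookup characterisations, one per priority
theorem pvLF0 (t : List Char) : (pvLookupTag t).map Prod.fst = some 0 ↔ t = "[ERROR]".toList := by
  unfold pvLookupTag; split_ifs <;> simp_all
theorem pvLF1 (t : List Char) : (pvLookupTag t).map Prod.fst = some 1 ↔ t = "[WARNING]".toList := by
  unfold pvLookupTag; split_ifs <;> simp_all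
theorem pvLF2 (t : List Char) : (pvLookupTag t).map Prod.fst = some 2 ↔ t = "[API_ERROR]".toList := by
  unfold pvLookupTag; split_ifs <;> simp_all
theorem pvLF3 (t : List Char) : (pvLookupTag t).map Prod.fst = some 3 ↔ t = "[INFO]".toList := by
  unfold pvLookupTag; split_ifs <;> simp_all
theorem pvLF4 (t : List Char) : (pvLookupTag t).map Prod.fst = some 4 ↔
    (t = "[API_REQUEST]".toList ∨ t = "[API_RESPONSE]".toList) := by
  unfold pvLookupTag; split_ifs <;> simp_all
theorem pvLF5 (t : List Char) : (pvLookupTag t).map Prod.fst = some 5 ↔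
    (t = "[TRANSLATION_START]".toList ∨ t = "[TRANSLATION_COMPLETE]".toList) := by
  unfold pvLookupTag; split_ifs <;> simp_all
theorem pvLF6 (t : List Char) : (pvLookupTag t).map Prod.fst = some 6 ↔ t = "[CHECK_RESULT]".toList := by
  unfold pvLookupTag; split_ifs <;> simp_all

theorem pvRanks_lt7 (cs : List Char) : ∀ r ∈ pvRanks cs, r < 7 := by
  intro r hr
  obtain ⟨t, _, ht⟩ := List.mem_filterMap.mp hr
  exact pvLookup_lt7 t r ht

-- a tag is found by the token scan iff it occurs in the line
theorem pvTok_iff (cs mid : List Char) (hm : ']' ∉ mid) :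
    ('[' :: mid ++ [']']) ∈ pvToks cs ↔ ('[' :: mid ++ [']']) <:+: cs :=
  ⟨pvToks_infix cs _, pvMem_toks_of_infix cs mid hm⟩

theorem pvInfix_iff_mem_ranks (cs : List Char) (tag : String) (r : Nat)
    (hiff : ∀ t, (pvLookupTag t).map Prod.fst = some r ↔ t = tag.toList)
    (mid : List Char) (hm : ']' ∉ mid) (htag : tag.toList = '[' :: mid ++ [']']) :
    (tag.toList <:+: cs ↔ r ∈ pvRanks cs) := by
  rw [htag, ← pvTok_iff cs mid hm]
  unfold pvRanks
  rw [List.mem_filterMap]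
  constructor
  · intro h; exact ⟨_, h, (hiff _).mpr htag.symm⟩
  · rintro ⟨t, ht, hl⟩
    have := (hiff t).mp hl
    rw [htag] at this
    exact this ▸ ht

theorem pvInfix_iff_mem_ranks2 (cs : List Char) (tagA tagB : String) (r : Nat)
    (hiff : ∀ t, (pvLookupTag t).map Prod.fst = some r ↔ (t = tagA.toList ∨ t = tagB.toList))
    (midA : List Char) (hmA : ']' ∉ midA) (htagA : tagA.toList = '[' :: midA ++ [']'])
    (midB : List Char) (hmB : ']' ∉ midB) (htagB : tagB.toList = '[' :: midB ++ [']']) :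
    ((tagA.toList <:+: cs ∨ tagB.toList <:+: cs) ↔ r ∈ pvRanks cs) := by
  unfold pvRanks
  rw [List.mem_filterMap]
  constructor
  · rintro (h | h)
    · refine ⟨tagA.toList, ?_, (hiff _).mpr (Or.inl rfl)⟩
      rw [htagA] at h ⊢
      exact pvMem_toks_of_infix cs midA hmA h
    · refine ⟨tagB.toList, ?_, (hiff _).mpr (Or.inr rfl)⟩
      rw [htagB] at h ⊢
      exact pvMem_toks_of_infix cs midB hmB h
  · rintro ⟨t, ht, hl⟩
    rcases (hiff t).mp hl with rfl | rfl
    · exact Or.inl (pvToks_infix cs _ ht)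
    · exact Or.inr (pvToks_infix cs _ ht)

-- the per-line core: B's minimum-priority token lookup equals A's branch chain
theorem pvColorize_eq (line : String) : pvColorizeB line = pvFmtLineA line := by
  have hscan : pvScanB line.toList none
      = ((pvRanks line.toList).min?).map (fun m => (m, pvColorTab m)) := by
    have h0 := pvFold_upd (pvToks line.toList) none
    rw [pvScanB_eq_fold]
    simpa [pvRanks, pvOptMin_none] using h0
  have hL : pvColorizeB line
      = (match (pvRanks line.toList).min? with
         | none => line
         | some r => "<span style=\"color: " ++ pvColorTab r ++ ";\">" ++ line ++ "</span>") := by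
    unfold pvColorizeB
    rw [hscan]
    cases (pvRanks line.toList).min? <;> rfl
  rw [hL, pvMin_chain _ (pvRanks_lt7 _)
    (fun r => "<span style=\"color: " ++ pvColorTab r ++ ";\">" ++ line ++ "</span>") line]
  have c0 : (PySem.Str.isIn "[ERROR]" line = true) ↔ (0 ∈ pvRanks line.toList) := by
    rw [PySem.Str.isIn_iff_infix]
    exact pvInfix_iff_mem_ranks _ _ _ pvLF0 "ERROR".toList (by decide) (by decide)
  have c1 : (PySem.Str.isIn "[WARNING]" line = true) ↔ (1 ∈ pvRanks line.toList) := by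
    rw [PySem.Str.isIn_iff_infix]
    exact pvInfix_iff_mem_ranks _ _ _ pvLF1 "WARNING".toList (by decide) (by decide)
  have c2 : (PySem.Str.isIn "[API_ERROR]" line = true) ↔ (2 ∈ pvRanks line.toList) := by
    rw [PySem.Str.isIn_iff_infix]
    exact pvInfix_iff_mem_ranks _ _ _ pvLF2 "API_ERROR".toList (by decide) (by decide)
  have c3 : (PySem.Str.isIn "[INFO]" line = true) ↔ (3 ∈ pvRanks line.toList) := by
    rw [PySem.Str.isIn_iff_infix]
    exact pvInfix_iff_mem_ranks _ _ _ pvLF3 "INFO".toList (by decide) (by decide)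
  have c4 : ((PySem.Str.isIn "[API_REQUEST]" line || PySem.Str.isIn "[API_RESPONSE]" line) = true)
      ↔ (4 ∈ pvRanks line.toList) := by
    rw [Bool.or_eq_true, PySem.Str.isIn_iff_infix, PySem.Str.isIn_iff_infix]
    exact pvInfix_iff_mem_ranks2 _ _ _ _ pvLF4 "API_REQUEST".toList (by decide) (by decide)
      "API_RESPONSE".toList (by decide) (by decide)
  have c5 : ((PySem.Str.isIn "[TRANSLATION_START]" line || PySem.Str.isIn "[TRANSLATION_COMPLETE]" line) = true)
      ↔ (5 ∈ pvRanks line.toList) := by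
    rw [Bool.or_eq_true, PySem.Str.isIn_iff_infix, PySem.Str.isIn_iff_infix]
    exact pvInfix_iff_mem_ranks2 _ _ _ _ pvLF5 "TRANSLATION_START".toList (by decide) (by decide)
      "TRANSLATION_COMPLETE".toList (by decide) (by decide)
  have c6 : (PySem.Str.isIn "[CHECK_RESULT]" line = true) ↔ (6 ∈ pvRanks line.toList) := by
    rw [PySem.Str.isIn_iff_infix]
    exact pvInfix_iff_mem_ranks _ _ _ pvLF6 "CHECK_RESULT".toList (by decide) (by decide)
  have e0 : "<span style=\"color: " ++ "#ff4444" ++ ";\">" = "<span style=\"color: #ff4444;\">" := by decide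
  have e1 : "<span style=\"color: " ++ "#ff8800" ++ ";\">" = "<span style=\"color: #ff8800;\">" := by decide
  have e2 : "<span style=\"color: " ++ "#cc0000" ++ ";\">" = "<span style=\"color: #cc0000;\">" := by decide
  have e3 : "<span style=\"color: " ++ "#4444ff" ++ ";\">" = "<span style=\"color: #4444ff;\">" := by decide
  have e4 : "<span style=\"color: " ++ "#44aa44" ++ ";\">" = "<span style=\"color: #44aa44;\">" := by decide
  have e5 : "<span style=\"color: " ++ "#aa44aa" ++ ";\">" = "<span style=\"color: #aa44aa;\">" := by decide
  have e6 : "<span style=\"color: " ++ "#44aaaa" ++ ";\">" = "<span style=\"color: #44aaaa;\">" := by decide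
  unfold pvFmtLineA
  simp only [c0, c1, c2, c3, c4, c5, c6, pvColorTab, e0, e1, e2, e3, e4, e5, e6]

theorem pvFoldl_append_eq_map (f : String → String) (xs : List String) :
    xs.foldl (fun acc line => acc ++ [f line]) [] = xs.map f := by
  simpa using PySem.List.foldl_append_singleton_eq_map f xs []

-- ===== VERDICT (by name: the statement is the Claim_ definition above) =====
theorem format_log_with_colors_spec : Claim_equal_format_log_with_colors := by
  intro content _
  unfold Spec_format_log_with_colors format_log_with_colors format_log_with_colors_alt
  simp only [pvFoldl_append_eq_map]
  rw [List.map_congr_left (fun l _ => (pvColorize_eq l).symm)]
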